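-- pv_equiv track=rewrite | github.com/VuLLM/VuLLM-OM | code_files/generate_vul_functions/gen_vul.py | delete_added_rows
-- ===== SOURCE A (Python) =====
-- def delete_added_rows(changes):
--     """
--     Deletes the added rows from the given list of changes.
--
--     Args:
--         changes (list): The list of changes.
--
--     Returns:
--         list: The modified list with added rows removed.
--     """
--     i = 0
--     while i < len(changes):
--         if changes[i][0] == "A":
--             changes.pop(i)
--             continue
--         i += 1
--     return changes
-- ===== SOURCE B (Python) =====
-- def delete_added_rows(changes):
--     """
--     Deletes the added rows from the given list of changes.
--
--     Args:
--         changes (list): The list of changes.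
--
--     Returns:
--         list: The modified list with added rows removed.
--     """
--     changes[:] = [row for row in changes if row[0] != "A"]
--     return changes
-- ===== Notes on version B (the rewrite author's own statement) =====
-- stated objective: idiomatic
-- what changed: Replaces the index-managed while loop with repeated pop(i) by a single filtering comprehension assigned back in place via changes[:] = ..., keeping the same list object.
import Mathlib
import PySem

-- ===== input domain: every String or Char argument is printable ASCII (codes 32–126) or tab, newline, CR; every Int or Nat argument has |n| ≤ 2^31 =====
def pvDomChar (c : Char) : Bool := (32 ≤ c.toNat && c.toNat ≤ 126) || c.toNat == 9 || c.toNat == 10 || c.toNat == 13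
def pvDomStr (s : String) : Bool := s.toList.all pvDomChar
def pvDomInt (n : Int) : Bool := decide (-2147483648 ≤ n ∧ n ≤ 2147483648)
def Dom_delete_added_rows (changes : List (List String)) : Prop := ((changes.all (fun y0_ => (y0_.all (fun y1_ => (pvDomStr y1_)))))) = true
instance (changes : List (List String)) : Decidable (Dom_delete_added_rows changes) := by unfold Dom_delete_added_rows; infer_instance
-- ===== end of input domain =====

-- Header: B replaces A's while-loop with repeated pop(i) by a single in-place filtering
-- comprehension (changes[:] = [...]); both mutate the argument list in place in Python,
-- the equivalence proved here is about the RETURN value.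

-- ===== PORT A =====
-- while i < len(changes): if changes[i][0] == "A": changes.pop(i); continue; i += 1
-- (changes[i][0] ported as headD "" — Pre_ guarantees every row is nonempty, matching Python)
def deleteLoopA (changes : List (List String)) (i : Nat) : List (List String) :=
  if h : i < changes.length then
    if (changes[i]).headD "" = "A" then
      deleteLoopA (changes.eraseIdx i) i
    else
      deleteLoopA changes (i + 1)
  else
    changes
termination_by changes.length - i
decreasing_by
  · have := List.length_eraseIdx (l := changes) (i := i)
    simp only [if_pos h] at this
    omega
  · omega

def delete_added_rows (changes : List (List String)) : List (List String) :=
  deleteLoopA changes 0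

-- ===== PORT B =====
-- changes[:] = [row for row in changes if row[0] != "A"]; return changes
def delete_added_rows_alt (changes : List (List String)) : List (List String) :=
  changes.filter (fun row => row.headD "" ≠ "A")

-- ===== PRECONDITION & SPEC =====
-- Pre_ excludes lists containing an empty row, on which Python A raises IndexError (changes[i][0]).
def Pre_delete_added_rows (changes : List (List String)) : Prop :=
  ∀ row ∈ changes, row ≠ []
instance (changes : List (List String)) : Decidable (Pre_delete_added_rows changes) := by
  unfold Pre_delete_added_rows; infer_instance

def pvWitness_delete_added_rows : List (List String) := [["A", "x"], ["M", "y"], ["D", "z"]]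

def Spec_delete_added_rows (changes : List (List String)) (out : List (List String)) : Prop := out = delete_added_rows_alt changes
instance (changes : List (List String)) (out : List (List String)) : Decidable (Spec_delete_added_rows changes out) := by unfold Spec_delete_added_rows; infer_instance

-- ===== CLAIM (what is proved, stated in full; the proofs are below) =====
def Claim_equal_delete_added_rows : Prop := ∀ (changes : List (List String)), Dom_delete_added_rows changes → Pre_delete_added_rows changes → Spec_delete_added_rows changes (delete_added_rows changes)

-- ===== LEMMAS AND PROOFS =====

-- Loop invariant: from index i, A's loop keeps the first i rows untouched and filters the rest.
theorem deleteLoopA_eq_filter (changes : List (List String)) (i : Nat) :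
    deleteLoopA changes i =
      changes.take i ++ (changes.drop i).filter (fun row => row.headD "" ≠ "A") := by
  by_cases h : i < changes.length
  · rw [deleteLoopA]
    simp only [h, dif_pos]
    have hdrop : changes.drop i = changes[i] :: changes.drop (i + 1) :=
      List.drop_eq_getElem_cons h
    by_cases hA : (changes[i]).headD "" = "A"
    · rw [if_pos hA, deleteLoopA_eq_filter (changes.eraseIdx i) i]
      rw [List.eraseIdx_eq_take_drop_succ]
      have hlen : (changes.take i).length = i := by
        simp [List.length_take, Nat.min_eq_left (Nat.le_of_lt h)]
      rw [List.take_append_of_le_length (by omega), List.take_take, Nat.min_self,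
        List.drop_append_of_le_length (by omega), List.drop_of_length_le (by omega),
        List.nil_append, hdrop, List.filter_cons]
      simp only [List.headD_eq_head?] at hA
      simp [hA]
    · rw [if_neg hA, deleteLoopA_eq_filter changes (i + 1)]
      have : changes.take (i + 1) = changes.take i ++ [changes[i]] :=
        List.take_succ_eq_append_getElem h
      rw [hdrop, List.filter_cons, if_pos (by simp only [List.headD_eq_head?] at hA; simpa using hA), this,
        List.append_assoc, List.singleton_append]
  · rw [deleteLoopA, dif_neg h, List.drop_eq_nil_of_le (Nat.le_of_not_lt h),
      List.take_of_length_le (Nat.le_of_not_lt h)]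
    simp
termination_by changes.length - i
decreasing_by
  · have := List.length_eraseIdx (l := changes) (i := i)
    simp only [if_pos h] at this
    omega
  · omega

-- ===== VERDICT (by name: the statement is the Claim_ definition above) =====
theorem delete_added_rows_spec : Claim_equal_delete_added_rows := by
  intro changes _ _
  unfold Spec_delete_added_rows delete_added_rows delete_added_rows_alt
  simpa using deleteLoopA_eq_filter changes 0
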